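-- pv_equiv track=rewrite | github.com/iamroshandamor20/E_Challan-Project | p5.py | last_name_check
-- ===== SOURCE A (Python) =====
-- def last_name_check(last_name):
--     fname_len = len(last_name)
--     fname_digit = False
--     for ele in last_name:
--         if ele.isdigit():
--             fname_digit = True
--             break
--
--     fname_special = False
--     for ele in last_name:
--         if not ele.isalpha() or ele.isspace() or ele.isdigit():
--             fname_special = True
--             break
--
--     if fname_len > 3:
--         if fname_digit is False or fname_special is False:
--             return 1
--         else:
--             return 0
--     else:
--         return 0
-- ===== SOURCE B (Python) =====
-- def last_name_check(last_name):
--     return 1 if len(last_name) > 3 and not any(ch.isdigit() for ch in last_name) else 0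
-- ===== Notes on version B (the rewrite author's own statement) =====
-- stated objective: simpler
-- what changed: Replaced the two flag-setting scans and the nested two-boolean decision with a single closed-form condition: len > 3 and no digit (the special-character scan is subsumed, since an all-alphabetic string has no digits).
import Mathlib
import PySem

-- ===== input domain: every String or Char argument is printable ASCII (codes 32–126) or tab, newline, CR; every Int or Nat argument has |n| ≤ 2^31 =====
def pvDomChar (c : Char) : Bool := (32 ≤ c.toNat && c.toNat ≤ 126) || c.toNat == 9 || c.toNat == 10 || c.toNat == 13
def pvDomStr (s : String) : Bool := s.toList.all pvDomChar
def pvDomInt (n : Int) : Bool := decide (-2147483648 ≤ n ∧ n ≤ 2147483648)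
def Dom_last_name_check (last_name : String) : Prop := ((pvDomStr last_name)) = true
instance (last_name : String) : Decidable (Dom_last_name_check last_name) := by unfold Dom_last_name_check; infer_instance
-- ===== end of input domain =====

-- B replaces A's two flag-setting scans and nested boolean decision with a single
-- condition (len > 3 and no digit); objective: simpler.


-- ===== PORT A =====
-- first for-loop: sets fname_digit and breaks on the first digit
def pvDigitLoop : List Char → Bool
  | [] => false
  | c :: cs => if PySem.Chars.isdigit c then true else pvDigitLoop cs

-- second for-loop: sets fname_special and breaks on the first non-alpha/space/digit char
def pvSpecialLoop : List Char → Bool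
  | [] => false
  | c :: cs =>
      if !PySem.Chars.isalpha c || PySem.Chars.isspace c || PySem.Chars.isdigit c then true
      else pvSpecialLoop cs

def last_name_check (last_name : String) : Int :=
  let fname_len := PySem.Str.len last_name
  let fname_digit := pvDigitLoop last_name.toList
  let fname_special := pvSpecialLoop last_name.toList
  if fname_len > 3 then
    if fname_digit = false ∨ fname_special = false then 1 else 0
  else 0

-- ===== PORT B =====
def last_name_check_alt (last_name : String) : Int :=
  if PySem.Str.len last_name > 3 ∧ !(last_name.toList.any PySem.Chars.isdigit) then 1 else 0

-- ===== PRECONDITION & SPEC =====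
def Spec_last_name_check (last_name : String) (out : Int) : Prop := out = last_name_check_alt last_name
instance (last_name : String) (out : Int) : Decidable (Spec_last_name_check last_name out) := by unfold Spec_last_name_check; infer_instance

-- ===== CLAIM (what is proved, stated in full; the proofs are below) =====
def Claim_equal_last_name_check : Prop := ∀ (last_name : String), Dom_last_name_check last_name → Spec_last_name_check last_name (last_name_check last_name)

-- ===== LEMMAS AND PROOFS =====

theorem pvDigitLoop_eq_any (l : List Char) : pvDigitLoop l = l.any PySem.Chars.isdigit := by
  induction l with
  | nil => rfl
  | cons c cs ih => cases h : PySem.Chars.isdigit c <;> simp [pvDigitLoop, h, ih]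

-- if the special-scan found nothing, every char is alphabetic, hence no digit
theorem pvSpecialLoop_false_no_digit (l : List Char) (h : pvSpecialLoop l = false) :
    l.any PySem.Chars.isdigit = false := by
  induction l with
  | nil => rfl
  | cons c cs ih =>
    simp only [pvSpecialLoop] at h
    split_ifs at h with hc
    -- the break branch yields true = false and is discharged by split_ifs itself
    · have hd : PySem.Chars.isdigit c = false := by
        revert hc; cases PySem.Chars.isdigit c <;> simp
      simp [List.any_cons, hd, ih h]

-- ===== VERDICT (by name: the statement is the Claim_ definition above) =====
theorem last_name_check_spec : Claim_equal_last_name_check := by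
  intro s _
  unfold Spec_last_name_check last_name_check last_name_check_alt
  simp only [pvDigitLoop_eq_any, PySem.Str.len_eq]
  by_cases hl : 3 < s.length
  · by_cases hd : s.toList.any PySem.Chars.isdigit
    · by_cases hs : pvSpecialLoop s.toList = false
      · have := pvSpecialLoop_false_no_digit _ hs
        simp [this] at hd
      · simp [hl, hd, hs]
    · simp [hl, hd]
  · simp [hl]
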